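-- pv_equiv track=rewrite | github.com/ApexLTD/apexdevkit | apexdevkit/fastapi/name.py | as_plural
-- ===== SOURCE A (Python) =====
-- def as_plural(singular: str) -> str:
--     suffixes = {
--         "y": "ies",
--         "ch": "ches",
--         "sh": "shes",
--         "s": "ses",
--         "z": "zes",
--         "x": "xes",
--         "fe": "ves",
--         "f": "ves",
--     }
--
--     for singular_suffix, plural_suffix in suffixes.items():
--         if singular.endswith(singular_suffix):
--             return singular.removesuffix(singular_suffix) + plural_suffix
--
--     return singular + "s"
-- ===== SOURCE B (Python) =====
-- TWO = {"ch": "ches", "sh": "shes", "fe": "ves"}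
-- ONE = {"y": "ies", "s": "ses", "z": "zes", "x": "xes", "f": "ves"}
--
--
-- def as_plural(singular: str) -> str:
--     plural = TWO.get(singular[-2:])
--     if plural is not None:
--         return singular[:-2] + plural
--     plural = ONE.get(singular[-1:])
--     if plural is not None:
--         return singular[:-1] + plural
--     return singular + "s"
-- ===== Notes on version B (the rewrite author's own statement) =====
-- stated objective: idiomatic
-- what changed: replaced the linear endswith/removesuffix scan over an 8-entry rule dict with direct lookups of the two- and one-character suffix slices in two precomputed length-keyed tables
import Mathlib
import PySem

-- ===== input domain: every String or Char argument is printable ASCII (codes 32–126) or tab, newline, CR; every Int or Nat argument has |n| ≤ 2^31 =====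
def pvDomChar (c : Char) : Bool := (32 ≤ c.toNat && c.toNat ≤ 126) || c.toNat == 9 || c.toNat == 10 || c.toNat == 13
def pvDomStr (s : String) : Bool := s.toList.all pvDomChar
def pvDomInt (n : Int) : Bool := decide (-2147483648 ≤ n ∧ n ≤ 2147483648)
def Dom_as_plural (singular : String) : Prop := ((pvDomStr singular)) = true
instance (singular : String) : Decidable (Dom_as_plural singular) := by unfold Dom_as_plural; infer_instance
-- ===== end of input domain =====

-- B replaces A's linear endswith/removesuffix scan over an 8-rule dict with direct
-- lookups of the two- and one-character suffix slices in two length-keyed tables (idiomatic).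


-- ===== PORT A =====
-- str.removesuffix (not in PySem): drop the suffix iff the string ends with it (exact)
def pyRemovesuffix (cs sf : List Char) : List Char :=
  if PySem.Chars.endswith cs sf then cs.take (cs.length - sf.length) else cs

-- the dict literal of A, in insertion order
def aSuffixes : List (List Char × List Char) :=
  [(['y'], ['i','e','s']), (['c','h'], ['c','h','e','s']), (['s','h'], ['s','h','e','s']),
   (['s'], ['s','e','s']), (['z'], ['z','e','s']), (['x'], ['x','e','s']),
   (['f','e'], ['v','e','s']), (['f'], ['v','e','s'])]

-- the for-loop over suffixes.items() with early return
def aLoop (cs : List Char) : List (List Char × List Char) → List Char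
  | [] => cs ++ ['s']
  | (sf, pl) :: rest =>
      if PySem.Chars.endswith cs sf then pyRemovesuffix cs sf ++ pl else aLoop cs rest

def as_plural (singular : String) : String :=
  String.ofList (aLoop singular.toList aSuffixes)

-- ===== PORT B =====
def twoTable : PySem.Dict (List Char) (List Char) :=
  PySem.Dict.mk [(['c','h'], ['c','h','e','s']), (['s','h'], ['s','h','e','s']), (['f','e'], ['v','e','s'])]

def oneTable : PySem.Dict (List Char) (List Char) :=
  PySem.Dict.mk [(['y'], ['i','e','s']), (['s'], ['s','e','s']), (['z'], ['z','e','s']),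
   (['x'], ['x','e','s']), (['f'], ['v','e','s'])]

def as_plural_alt (singular : String) : String :=
  let cs := singular.toList
  match PySem.Dict.get? twoTable (PySem.List.slice cs (some (-2)) none) with
  | some pl => String.ofList (PySem.List.slice cs none (some (-2)) ++ pl)
  | none =>
    match PySem.Dict.get? oneTable (PySem.List.slice cs (some (-1)) none) with
    | some pl => String.ofList (PySem.List.slice cs none (some (-1)) ++ pl)
    | none => String.ofList (cs ++ ['s'])

-- ===== PRECONDITION & SPEC =====
def Spec_as_plural (singular : String) (out : String) : Prop := out = as_plural_alt singular
instance (singular : String) (out : String) : Decidable (Spec_as_plural singular out) := by unfold Spec_as_plural; infer_instance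

-- ===== CLAIM (what is proved, stated in full; the proofs are below) =====
def Claim_equal_as_plural : Prop := ∀ (singular : String), Dom_as_plural singular → Spec_as_plural singular (as_plural singular)

-- ===== LEMMAS AND PROOFS =====
-- the list-level body of B (what as_plural_alt computes before wrapping in String.ofList)
def bList (cs : List Char) : List Char :=
  match PySem.Dict.get? twoTable (PySem.List.slice cs (some (-2)) none) with
  | some pl => PySem.List.slice cs none (some (-2)) ++ pl
  | none =>
    match PySem.Dict.get? oneTable (PySem.List.slice cs (some (-1)) none) with
    | some pl => PySem.List.slice cs none (some (-1)) ++ pl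
    | none => cs ++ ['s']

set_option maxHeartbeats 1000000 in
theorem main_lists (cs : List Char) : aLoop cs aSuffixes = bList cs := by
  rcases cs.eq_nil_or_concat with rfl | ⟨xs, a, rfl⟩
  · decide
  rcases xs.eq_nil_or_concat with rfl | ⟨ys, b, rfl⟩
  · -- cs = [a]: only the one-character table can match
    simp only [bList]
    rw [PySem.List.slice_from_neg_ofNat _ 2 (by omega), PySem.List.slice_from_neg_one]
    simp only [aLoop, aSuffixes, pyRemovesuffix, PySem.Chars.endswith, List.isSuffixOf,
      List.reverse_cons, List.reverse_nil, List.nil_append, List.length_cons,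
      List.length_nil, twoTable, oneTable, PySem.Dict.get?_mk_cons]
    simp only [PySem.Dict.get?, List.find?]
    by_cases hy : 'y' = a
    · subst hy; simp [PySem.List.slice_to_neg_one]
    by_cases hs : 's' = a
    · subst hs; simp [PySem.List.slice_to_neg_one]
    by_cases hz : 'z' = a
    · subst hz; simp [PySem.List.slice_to_neg_one]
    by_cases hx : 'x' = a
    · subst hx; simp [PySem.List.slice_to_neg_one]
    by_cases hf : 'f' = a
    · subst hf; simp [PySem.List.slice_to_neg_one]
    · simp [hy, hs, hz, hx, hf]
  · -- cs = ys ++ [b, a]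
    have hcs : ys ++ [b, a] = (ys ++ [b]) ++ [a] := by simp
    simp only [List.concat_eq_append, List.append_assoc, List.cons_append, List.nil_append]
    simp only [bList]
    rw [PySem.List.slice_from_neg_ofNat _ 2 (by omega), PySem.List.slice_to_neg_ofNat _ 2 (by omega),
        PySem.List.slice_from_neg_one, PySem.List.slice_to_neg_one]
    have h2 : (ys ++ [b, a]).drop ((ys ++ [b, a]).length - 2) = [b, a] := by simp
    have h1 : (ys ++ [b, a]).drop ((ys ++ [b, a]).length - 1) = [a] := by
      rw [hcs]; simp
    have hdl : (ys ++ [b, a]).dropLast = ys ++ [b] := by rw [hcs]; simp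
    have ht1 : ∀ c : Char, List.take (ys.length + 1) (ys ++ [b, c]) = ys ++ [b] := by
      intro c
      have h : ys ++ [b, c] = (ys ++ [b]) ++ [c] := by simp
      rw [h]; exact List.take_left' (by simp)
    rw [h2, h1]
    simp only [aLoop, aSuffixes, pyRemovesuffix, PySem.Chars.endswith, List.isSuffixOf,
      List.isPrefixOf, List.reverse_append, List.reverse_cons, List.reverse_nil, List.nil_append,
      List.cons_append, twoTable, oneTable, PySem.Dict.get?_mk_cons,
      List.length_cons, List.length_nil]
    simp only [PySem.Dict.get?, List.find?]
    by_cases hy : 'y' = a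
    · subst hy; simp [ht1, hdl]
    by_cases hh : 'h' = a
    · subst hh
      by_cases hc : 'c' = b
      · subst hc; simp
      by_cases hs : 's' = b
      · subst hs; simp
      · simp [hc, hs]
    by_cases he : 'e' = a
    · subst he
      by_cases hf : 'f' = b
      · subst hf; simp
      · simp [hf]
    by_cases hs : 's' = a
    · subst hs; simp [ht1, hdl]
    by_cases hz : 'z' = a
    · subst hz; simp [ht1, hdl]
    by_cases hx : 'x' = a
    · subst hx; simp [ht1, hdl]
    by_cases hf : 'f' = a
    · subst hf; simp [ht1, hdl]
    · simp [hy, hh, he, hs, hz, hx, hf]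

-- ===== VERDICT (by name: the statement is the Claim_ definition above) =====
theorem as_plural_spec : Claim_equal_as_plural := by
  intro s _
  show _ = _
  unfold as_plural as_plural_alt
  rw [main_lists]
  cases h2 : PySem.Dict.get? twoTable (PySem.List.slice s.toList (some (-2)) none)
  · cases h1 : PySem.Dict.get? oneTable (PySem.List.slice s.toList (some (-1)) none)
    · simp [bList, h2, h1]
    · simp [bList, h2, h1]
  · simp [bList, h2]
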